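-- pv_equiv track=rewrite | github.com/kingstonv1/calico | python/cc-fa22/tower.py | solve
-- ===== SOURCE A (Python) =====
-- def solve(powers, distances, towers):
--     hours = list()
--
--     for x in range(towers):
--         time = 0
--         power = 0
--
--         for y in range(towers):
--             towPow = powers[(x + y) % len(powers)]
--
--             # If Herry must wait
--             if towPow > power:
--                 time += towPow - power
--                 power = towPow
--
--             elif towPow <= power:
--                 pass
--
--             # If Herry isn't at the last tower, add travel distance to time and power
--             if y != towers - 1:
--                 d = distances[(x + y) % len(distances)]
--                 time += d
--                 power += d
--
--         hours.append(time)
--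
--     return min(hours)
-- ===== SOURCE B (Python) =====
-- def solve(powers, distances, towers):
--     # Closed form per start: total waiting equals the peak of (tower power minus
--     # distance already travelled), never negative; answer = travel + that peak.
--     L, M = len(powers), len(distances)
--
--     def start_time(x):
--         s = [0]  # s[y] = distance travelled before reaching tower y
--         for y in range(towers - 1):
--             s.append(s[-1] + distances[(x + y) % M])
--         peak = max(powers[(x + y) % L] - s[y] for y in range(towers))
--         return s[-1] + (peak if peak > 0 else 0)
--
--     return min(start_time(x) for x in range(towers))
-- ===== Notes on version B (the rewrite author's own statement) =====
-- stated objective: alternative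
-- what changed: A simulates the walk per start, updating a (time, power) state with conditional waits; B computes each start's answer in closed form as travelled-distance prefix sums plus a single maximum of power-minus-prefix (total waiting = positive part of that peak), with no simulation state.
import Mathlib
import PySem

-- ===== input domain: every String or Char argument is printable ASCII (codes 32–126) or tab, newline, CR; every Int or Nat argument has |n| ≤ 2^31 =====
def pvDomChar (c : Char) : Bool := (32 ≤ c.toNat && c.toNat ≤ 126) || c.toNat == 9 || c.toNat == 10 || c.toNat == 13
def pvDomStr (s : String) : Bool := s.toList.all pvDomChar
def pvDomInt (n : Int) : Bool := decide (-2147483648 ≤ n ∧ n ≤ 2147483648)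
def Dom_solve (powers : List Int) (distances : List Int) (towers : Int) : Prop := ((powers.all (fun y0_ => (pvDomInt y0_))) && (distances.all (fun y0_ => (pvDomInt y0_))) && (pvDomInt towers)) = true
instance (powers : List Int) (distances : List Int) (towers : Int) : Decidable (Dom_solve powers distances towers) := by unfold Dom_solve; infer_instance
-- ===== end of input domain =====

-- B replaces A's per-start wait/power simulation by a closed form (prefix sums of
-- the travelled distances plus one max of power-minus-prefix); objective: alternative.

-- ===== PORT A =====
-- one inner-loop step of A: update (time, power) at tower index y
def aStep (powers : List Int) (distances : List Int) (towers : Int) (x : Int)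
    (st : Int × Int) (y : Int) : Int × Int :=
  let towPow := PySem.List.pyGetD powers (PySem.Int.mod (x + y) (powers.length : Int)) 0
  let st' := if towPow > st.2 then (st.1 + (towPow - st.2), towPow) else st
  if y ≠ towers - 1 then
    let d := PySem.List.pyGetD distances (PySem.Int.mod (x + y) (distances.length : Int)) 0
    (st'.1 + d, st'.2 + d)
  else st'

def solve (powers : List Int) (distances : List Int) (towers : Int) : Int :=
  let hours := (PySem.List.pyRange 0 towers 1).map (fun x =>
    ((PySem.List.pyRange 0 towers 1).foldl (aStep powers distances towers x) (0, 0)).1)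
  (PySem.List.min? hours (fun v => v)).getD 0

-- ===== PORT B =====
-- s[y] = distance travelled before reaching tower y (built by appending onto [0])
def bPrefix (distances : List Int) (towers : Int) (x : Int) : List Int :=
  (PySem.List.pyRange 0 (towers - 1) 1).foldl (fun s y =>
    s ++ [PySem.List.pyGetD s (-1) 0 +
          PySem.List.pyGetD distances (PySem.Int.mod (x + y) (distances.length : Int)) 0]) [0]

def bStart (powers : List Int) (distances : List Int) (towers : Int) (x : Int) : Int :=
  let s := bPrefix distances towers x
  let peak := (PySem.List.max? ((PySem.List.pyRange 0 towers 1).map (fun y =>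
      PySem.List.pyGetD powers (PySem.Int.mod (x + y) (powers.length : Int)) 0 -
      PySem.List.pyGetD s y 0)) (fun v => v)).getD 0
  PySem.List.pyGetD s (-1) 0 + (if peak > 0 then peak else 0)

def solve_alt (powers : List Int) (distances : List Int) (towers : Int) : Int :=
  (PySem.List.min? ((PySem.List.pyRange 0 towers 1).map
      (bStart powers distances towers)) (fun v => v)).getD 0

-- ===== PRECONDITION & SPEC =====
-- Pre_ excludes exactly the inputs where Python A raises: towers ≤ 0 (min of an empty
-- list, ValueError) or powers = [] or (towers ≥ 2 and distances = []) (mod 0, ZeroDivisionError).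
def Pre_solve (powers : List Int) (distances : List Int) (towers : Int) : Prop :=
  powers ≠ [] ∧ 1 ≤ towers ∧ (distances ≠ [] ∨ towers = 1)
instance (powers : List Int) (distances : List Int) (towers : Int) : Decidable (Pre_solve powers distances towers) := by unfold Pre_solve; infer_instance

def pvWitness_solve : List Int × List Int × Int := ([2, 5, 3], [1, 2], 3)

def Spec_solve (powers : List Int) (distances : List Int) (towers : Int) (out : Int) : Prop := out = solve_alt powers distances towers
instance (powers : List Int) (distances : List Int) (towers : Int) (out : Int) : Decidable (Spec_solve powers distances towers out) := by unfold Spec_solve; infer_instance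

-- ===== CLAIM (what is proved, stated in full; the proofs are below) =====
def Claim_equal_solve : Prop := ∀ (powers : List Int) (distances : List Int) (towers : Int), Dom_solve powers distances towers → Pre_solve powers distances towers → Spec_solve powers distances towers (solve powers distances towers)

-- ===== LEMMAS AND PROOFS =====

-- mathematical shorthands (proof-only)
def pvD (distances : List Int) (x j : Int) : Int :=
  PySem.List.pyGetD distances (PySem.Int.mod (x + j) (distances.length : Int)) 0
def pvP (powers : List Int) (x j : Int) : Int :=
  PySem.List.pyGetD powers (PySem.Int.mod (x + j) (powers.length : Int)) 0
def pvS (distances : List Int) (x : Int) : Nat → Int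
  | 0 => 0
  | k + 1 => pvS distances x k + pvD distances x (k : Int)
def pvM (powers : List Int) (distances : List Int) (x : Int) : Nat → Int
  | 0 => 0
  | k + 1 => max (pvM powers distances x k) (pvP powers x (k : Int) - pvS distances x k)

theorem foldl_max_pull (t : List Int) : ∀ a b : Int, t.foldl max (max b a) = max b (t.foldl max a) := by
  induction t with
  | nil => intro a b; rfl
  | cons h t ih =>
    intro a b
    simp only [List.foldl_cons]
    rw [max_assoc, ih (max a h) b]

theorem pvM_eq_foldl (powers distances : List Int) (x : Int) (n : Nat) :
    pvM powers distances x n =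
      ((List.range n).map (fun (k : Nat) => pvP powers x (k : Int) - pvS distances x k)).foldl max 0 := by
  induction n with
  | zero => rfl
  | succ n ih =>
    rw [List.range_succ, List.map_append, List.foldl_append, ← ih]
    rfl

theorem bPrefix_fold (distances : List Int) (x : Int) (m : Nat) :
    (PySem.List.pyRange 0 (m : Int) 1).foldl (fun s y =>
      s ++ [PySem.List.pyGetD s (-1) 0 +
            PySem.List.pyGetD distances (PySem.Int.mod (x + y) (distances.length : Int)) 0]) [0]
    = (List.range (m + 1)).map (pvS distances x) := by
  induction m with
  | zero => simp [PySem.List.pyRange_one_eq_nil, List.range_succ]; rfl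
  | succ m ih =>
    rw [show ((m + 1 : Nat) : Int) = (m : Int) + 1 by push_cast; ring,
        PySem.List.pyRange_one_succ_right (by positivity), List.foldl_append, ih]
    simp only [List.foldl_cons, List.foldl_nil]
    have h1 : PySem.List.pyGetD ((List.range (m + 1)).map (pvS distances x)) (-1) 0
        = pvS distances x m := by
      rw [show (List.range (m + 1)).map (pvS distances x)
            = (List.range m).map (pvS distances x) ++ [pvS distances x m] by
          rw [List.range_succ, List.map_append]; rfl]
      exact PySem.List.pyGetD_neg_one_append_singleton _ _ _
    rw [h1]
    have h2 : (List.range (m + 1 + 1)).map (pvS distances x)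
        = (List.range (m + 1)).map (pvS distances x) ++ [pvS distances x (m + 1)] := by
      rw [List.range_succ (n := m + 1), List.map_append]; rfl
    rw [h2]
    rfl

theorem aFold_eq (powers distances : List Int) (x : Int) (n : Nat) (hn : 1 ≤ n) :
    ∀ k : Nat, k ≤ n →
    (PySem.List.pyRange 0 (k : Int) 1).foldl (aStep powers distances (n : Int) x) (0, 0)
      = (pvS distances x (min k (n - 1)) + pvM powers distances x k,
         pvS distances x (min k (n - 1)) + pvM powers distances x k) := by
  intro k
  induction k with
  | zero => intro _; simp [PySem.List.pyRange_one_eq_nil]; rfl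
  | succ k ih =>
    intro hk
    have hk' : k ≤ n := by omega
    have hmin : min k (n - 1) = k := by omega
    rw [show ((k + 1 : Nat) : Int) = (k : Int) + 1 by push_cast; ring,
        PySem.List.pyRange_one_succ_right (by positivity), List.foldl_append, ih hk']
    simp only [List.foldl_cons, List.foldl_nil, hmin]
    have hP : PySem.List.pyGetD powers (PySem.Int.mod (x + (k : Int)) (powers.length : Int)) 0
        = pvP powers x (k : Int) := rfl
    have hD : PySem.List.pyGetD distances (PySem.Int.mod (x + (k : Int)) (distances.length : Int)) 0
        = pvD distances x (k : Int) := rfl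
    have hM : pvM powers distances x (k + 1)
        = max (pvM powers distances x k) (pvP powers x (k : Int) - pvS distances x k) := rfl
    have hS : pvS distances x (k + 1) = pvS distances x k + pvD distances x (k : Int) := rfl
    simp only [aStep, hP, hD]
    by_cases hlast : k = n - 1
    · rw [if_neg (show ¬ ((k : Int) ≠ (n : Int) - 1) by omega)]
      have hmin2 : min (k + 1) (n - 1) = k := by omega
      rw [hmin2]
      split_ifs with h
      · refine Prod.ext ?_ ?_ <;> simp only [hM] <;> omega
      · refine Prod.ext ?_ ?_ <;> simp only [hM] <;> omega
    · rw [if_pos (show ((k : Int) ≠ (n : Int) - 1) by omega)]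
      have hmin2 : min (k + 1) (n - 1) = k + 1 := by omega
      rw [hmin2, hS]
      split_ifs with h
      · refine Prod.ext ?_ ?_ <;> simp only [hM] <;> omega
      · refine Prod.ext ?_ ?_ <;> simp only [hM] <;> omega

theorem peak_fold (l : List Int) :
    (let peak := (PySem.List.max? l (fun v => v)).getD 0
     if peak > 0 then peak else 0) = l.foldl max 0 := by
  cases l with
  | nil => rfl
  | cons a t =>
    rw [PySem.List.max?_id_cons]
    simp only [Option.getD_some, List.foldl_cons]
    rw [show max (0 : Int) a = max 0 a from rfl, foldl_max_pull t a 0]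
    rcases le_or_gt (t.foldl max a) 0 with h | h
    · rw [if_neg (by omega), max_eq_left h]
    · rw [if_pos h, max_eq_right (le_of_lt h)]

theorem inner_eq (powers distances : List Int) (x : Int) (n : Nat) (hn : 1 ≤ n) :
    ((PySem.List.pyRange 0 (n : Int) 1).foldl (aStep powers distances (n : Int) x) (0, 0)).1
      = bStart powers distances (n : Int) x := by
  rw [aFold_eq powers distances x n hn n le_rfl]
  unfold bStart
  have hpre : bPrefix distances (n : Int) x = (List.range ((n - 1) + 1)).map (pvS distances x) := by
    unfold bPrefix
    rw [show (n : Int) - 1 = ((n - 1 : Nat) : Int) by omega]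
    exact bPrefix_fold distances x (n - 1)
  have hsplit : (List.range ((n - 1) + 1)).map (pvS distances x)
      = (List.range (n - 1)).map (pvS distances x) ++ [pvS distances x (n - 1)] := by
    rw [List.range_succ, List.map_append]; rfl
  have hlast : PySem.List.pyGetD (bPrefix distances (n : Int) x) (-1) 0 = pvS distances x (n - 1) := by
    rw [hpre, hsplit, PySem.List.pyGetD_neg_one_append_singleton]
  have hlist : (PySem.List.pyRange 0 (n : Int) 1).map (fun y =>
      PySem.List.pyGetD powers (PySem.Int.mod (x + y) (powers.length : Int)) 0 -
      PySem.List.pyGetD (bPrefix distances (n : Int) x) y 0)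
      = (List.range n).map (fun (k : Nat) => pvP powers x (k : Int) - pvS distances x k) := by
    rw [PySem.List.pyRange_zero_nat, List.map_map]
    refine List.map_congr_left ?_
    intro k hk
    have hk' : k < n := List.mem_range.mp hk
    simp only [Function.comp]
    rw [hpre]
    rw [PySem.List.pyGetD_natCast, PySem.List.getD_map_range _ _ _ _ (by omega)]
    rfl
  simp only [hlist, hlast]
  rw [peak_fold ((List.range n).map (fun (k : Nat) => pvP powers x (k : Int) - pvS distances x k))]
  rw [← pvM_eq_foldl, Nat.min_eq_right (by omega)]

-- ===== VERDICT (by name: the statement is the Claim_ definition above) =====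
theorem solve_spec : Claim_equal_solve := by
  intro powers distances towers _hDom hPre
  unfold Spec_solve
  obtain ⟨-, hT, -⟩ := hPre
  have hmap : (PySem.List.pyRange 0 towers 1).map (fun x =>
        ((PySem.List.pyRange 0 towers 1).foldl (aStep powers distances towers x) (0, 0)).1)
      = (PySem.List.pyRange 0 towers 1).map (bStart powers distances towers) := by
    apply List.map_congr_left
    intro x _
    rw [show towers = ((towers.toNat : Nat) : Int) by omega]
    exact inner_eq powers distances x towers.toNat (by omega)
  simp only [solve, solve_alt, hmap]
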